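-- pv_equiv track=rewrite | github.com/skvndyk/AdventOfCode | 2016/day2-2016.py | squareCode
-- ===== SOURCE A (Python) =====
-- SQUARE_GRID = [(1, 2, 3), (4, 5, 6), (7, 8, 9)]
--
-- DIRECTIONS = {
--     "U": [-1, 0],
--     "D": [1, 0],
--     "L": [0, -1],
--     "R": [0, 1]
-- }
--
-- def squareCode(lines):
--     boundary = len(SQUARE_GRID)
--
--     loc = [1, 1]
--     code = ""
--
--     for line in lines:
--         for step in line:
--             direction = DIRECTIONS[step]
--             loc = [x + y for x, y in zip(direction, loc)]
--             while not(all(pt in range(0, boundary) for pt in loc)):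
--                 loc = goBack(loc, direction)
--         num = str(SQUARE_GRID[loc[0]][loc[1]])
--         code += num
--     return code
--
-- def goBack(loc, direction):
--     return [x + y for x, y in zip([-x for x in direction], loc)]
-- ===== SOURCE B (Python) =====
-- NEIGHBOR = {
--     1: {"U": 1, "D": 4, "L": 1, "R": 2},
--     2: {"U": 2, "D": 5, "L": 1, "R": 3},
--     3: {"U": 3, "D": 6, "L": 2, "R": 3},
--     4: {"U": 1, "D": 7, "L": 4, "R": 5},
--     5: {"U": 2, "D": 8, "L": 4, "R": 6},
--     6: {"U": 3, "D": 9, "L": 5, "R": 6},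
--     7: {"U": 4, "D": 7, "L": 7, "R": 8},
--     8: {"U": 5, "D": 8, "L": 7, "R": 9},
--     9: {"U": 6, "D": 9, "L": 8, "R": 9},
-- }
--
-- def squareCode(lines):
--     cur = 5
--     code = []
--     for line in lines:
--         for step in line:
--             cur = NEIGHBOR[cur][step]
--         code.append(str(cur))
--     return "".join(code)
-- ===== Notes on version B (the rewrite author's own statement) =====
-- stated objective: idiomatic
-- what changed: Replaces coordinate vectors, zip-based addition, the boundary check and the goBack clamping loop with a single precomputed neighbour table keyed by digit and direction (edge moves map a digit to itself); the current digit is the whole state.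
import Mathlib
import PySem

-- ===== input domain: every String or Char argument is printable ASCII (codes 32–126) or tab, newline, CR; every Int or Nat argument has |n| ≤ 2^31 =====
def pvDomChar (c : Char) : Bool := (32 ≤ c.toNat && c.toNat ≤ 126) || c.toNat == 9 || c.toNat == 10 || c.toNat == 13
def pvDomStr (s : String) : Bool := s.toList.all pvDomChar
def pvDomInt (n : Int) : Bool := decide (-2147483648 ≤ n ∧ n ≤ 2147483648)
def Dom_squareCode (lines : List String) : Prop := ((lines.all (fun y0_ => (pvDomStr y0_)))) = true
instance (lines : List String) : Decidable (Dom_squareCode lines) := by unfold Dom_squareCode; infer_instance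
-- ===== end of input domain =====

-- B is an idiomatic re-implementation by neighbour table; equivalence is about the return value only.
-- ===== PORT A =====
-- SQUARE_GRID
def sqGrid : List (List Int) := [[1, 2, 3], [4, 5, 6], [7, 8, 9]]

-- DIRECTIONS[step]; a char outside "UDLR" raises KeyError in Python (excluded by Pre_), ported as (0,0)
def dirOf (c : Char) : Int × Int :=
  if c = 'U' then (-1, 0) else if c = 'D' then (1, 0)
  else if c = 'L' then (0, -1) else if c = 'R' then (0, 1) else (0, 0)

-- goBack(loc, direction)
def goBackA (loc direction : Int × Int) : Int × Int := (loc.1 - direction.1, loc.2 - direction.2)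

-- all(pt in range(0, boundary) for pt in loc), boundary = 3
def inBoundA (loc : Int × Int) : Bool :=
  decide (0 ≤ loc.1 ∧ loc.1 < 3 ∧ 0 ≤ loc.2 ∧ loc.2 < 3)

-- the 'while not(...)' clamping loop, with fuel making it total (one iteration suffices on admitted inputs)
def clampA : Nat → (Int × Int) → (Int × Int) → (Int × Int)
  | 0, loc, _ => loc
  | n + 1, loc, direction =>
      if inBoundA loc then loc else clampA n (goBackA loc direction) direction

-- body of the inner 'for step in line'
def stepA (loc : Int × Int) (c : Char) : Int × Int :=
  let direction := dirOf c
  clampA 8 (direction.1 + loc.1, direction.2 + loc.2) direction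

-- body of the outer 'for line in lines'
def lineA (st : (Int × Int) × List Char) (line : String) : (Int × Int) × List Char :=
  let loc := line.toList.foldl stepA st.1
  (loc, st.2 ++ PySem.Int.toChars
      (PySem.List.pyGetD (PySem.List.pyGetD sqGrid loc.1 []) loc.2 0))

def squareCode (lines : List String) : String :=
  String.mk (lines.foldl lineA ((1, 1), [])).2

-- ===== PORT B =====
-- NEIGHBOR[cur][step]; unreachable entries (cur outside 1..9 or step outside "UDLR") default harmlessly
def nbr (cur : Int) (step : Char) : Int :=
  if cur = 1 then (if step = 'U' then 1 else if step = 'D' then 4 else if step = 'L' then 1 else if step = 'R' then 2 else cur)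
  else if cur = 2 then (if step = 'U' then 2 else if step = 'D' then 5 else if step = 'L' then 1 else if step = 'R' then 3 else cur)
  else if cur = 3 then (if step = 'U' then 3 else if step = 'D' then 6 else if step = 'L' then 2 else if step = 'R' then 3 else cur)
  else if cur = 4 then (if step = 'U' then 1 else if step = 'D' then 7 else if step = 'L' then 4 else if step = 'R' then 5 else cur)
  else if cur = 5 then (if step = 'U' then 2 else if step = 'D' then 8 else if step = 'L' then 4 else if step = 'R' then 6 else cur)
  else if cur = 6 then (if step = 'U' then 3 else if step = 'D' then 9 else if step = 'L' then 5 else if step = 'R' then 6 else cur)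
  else if cur = 7 then (if step = 'U' then 4 else if step = 'D' then 7 else if step = 'L' then 7 else if step = 'R' then 8 else cur)
  else if cur = 8 then (if step = 'U' then 5 else if step = 'D' then 8 else if step = 'L' then 7 else if step = 'R' then 9 else cur)
  else if cur = 9 then (if step = 'U' then 6 else if step = 'D' then 9 else if step = 'L' then 8 else if step = 'R' then 9 else cur)
  else cur

-- body of B's 'for line in lines': advance cur through the line, append str(cur) to code
def lineB (st : Int × List (List Char)) (line : String) : Int × List (List Char) :=
  let cur := line.toList.foldl nbr st.1
  (cur, st.2 ++ [PySem.Int.toChars cur])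

def squareCode_alt (lines : List String) : String :=
  String.mk ((lines.foldl lineB (5, [])).2).flatten

-- ===== PRECONDITION & SPEC =====
-- Pre_ excludes exactly the inputs where A raises KeyError: any character outside "UDLR".
def Pre_squareCode (lines : List String) : Prop :=
  (lines.all (fun l => l.toList.all (fun c => c = 'U' ∨ c = 'D' ∨ c = 'L' ∨ c = 'R'))) = true
instance (lines : List String) : Decidable (Pre_squareCode lines) := by
  unfold Pre_squareCode; infer_instance

def pvWitness_squareCode : List String := ["ULL", "RRDDD", "LURDL", "UUUUD"]

def Spec_squareCode (lines : List String) (out : String) : Prop := out = squareCode_alt lines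
instance (lines : List String) (out : String) : Decidable (Spec_squareCode lines out) := by
  unfold Spec_squareCode; infer_instance

-- ===== CLAIM (what is proved, stated in full; the proofs are below) =====
def Claim_equal_squareCode : Prop :=
  ∀ (lines : List String), Dom_squareCode lines → Pre_squareCode lines →
    Spec_squareCode lines (squareCode lines)

-- ===== LEMMAS AND PROOFS =====

-- invariant tying A's coordinate pair to B's current digit
def RelAB (loc : Int × Int) (d : Int) : Prop :=
  d = 3 * loc.1 + loc.2 + 1 ∧ 0 ≤ loc.1 ∧ loc.1 < 3 ∧ 0 ≤ loc.2 ∧ loc.2 < 3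

lemma rel_step {loc : Int × Int} {d : Int} (h : RelAB loc d) {c : Char}
    (hc : c = 'U' ∨ c = 'D' ∨ c = 'L' ∨ c = 'R') :
    RelAB (stepA loc c) (nbr d c) := by
  obtain ⟨r, k⟩ := loc
  obtain ⟨hd, hr0, hr3, hk0, hk3⟩ := h
  simp only at hd
  have hr : r = 0 ∨ r = 1 ∨ r = 2 := by omega
  have hk : k = 0 ∨ k = 1 ∨ k = 2 := by omega
  subst hd
  rcases hr with rfl | rfl | rfl <;> rcases hk with rfl | rfl | rfl <;>
    rcases hc with rfl | rfl | rfl | rfl <;>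
    exact ⟨by decide, by decide, by decide, by decide, by decide⟩

lemma rel_foldl {cs : List Char} :
    ∀ {loc : Int × Int} {d : Int}, RelAB loc d →
    (∀ c ∈ cs, c = 'U' ∨ c = 'D' ∨ c = 'L' ∨ c = 'R') →
    RelAB (cs.foldl stepA loc) (cs.foldl nbr d) := by
  induction cs with
  | nil => intro _ _ h _; exact h
  | cons c cs ih =>
      intro loc d h hcs
      simp only [List.foldl_cons]
      exact ih (rel_step h (hcs c (by simp))) (fun x hx => hcs x (by simp [hx]))

lemma rel_chars {loc : Int × Int} {d : Int} (h : RelAB loc d) :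
    PySem.Int.toChars (PySem.List.pyGetD (PySem.List.pyGetD sqGrid loc.1 []) loc.2 0)
      = PySem.Int.toChars d := by
  obtain ⟨r, k⟩ := loc
  obtain ⟨hd, hr0, hr3, hk0, hk3⟩ := h
  simp only at hd
  have hr : r = 0 ∨ r = 1 ∨ r = 2 := by omega
  have hk : k = 0 ∨ k = 1 ∨ k = 2 := by omega
  subst hd
  rcases hr with rfl | rfl | rfl <;> rcases hk with rfl | rfl | rfl <;> decide

lemma fold_lines {lines : List String} :
    ∀ {loc : Int × Int} {d : Int} {accA : List Char} {accB : List (List Char)},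
    RelAB loc d → accA = accB.flatten →
    (lines.all (fun l => l.toList.all (fun c => c = 'U' ∨ c = 'D' ∨ c = 'L' ∨ c = 'R'))) = true →
    (lines.foldl lineA (loc, accA)).2 = ((lines.foldl lineB (d, accB)).2).flatten := by
  induction lines with
  | nil => intro _ _ _ _ _ hacc _; simpa using hacc
  | cons l ls ih =>
      intro loc d accA accB h hacc hpre
      simp only [List.all_cons, Bool.and_eq_true] at hpre
      have hl : ∀ c ∈ l.toList, c = 'U' ∨ c = 'D' ∨ c = 'L' ∨ c = 'R' := by
        intro c hc
        have := hpre.1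
        simp only [List.all_eq_true, decide_eq_true_eq] at this
        exact this c hc
      have hrel := rel_foldl h hl
      simp only [List.foldl_cons, lineA, lineB]
      exact ih hrel (by simp [hacc, rel_chars hrel]) hpre.2

theorem squareCode_spec_aux (lines : List String) (hpre : Pre_squareCode lines) :
    squareCode lines = squareCode_alt lines := by
  unfold squareCode squareCode_alt
  have h0 : RelAB (1, 1) 5 := ⟨by decide, by decide, by decide, by decide, by decide⟩
  rw [@fold_lines lines (1, 1) 5 [] [] h0 rfl hpre]

-- ===== VERDICT (by name: the statement is the Claim_ definition above) =====
theorem squareCode_spec : Claim_equal_squareCode := by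
  intro lines _ hpre
  exact squareCode_spec_aux lines hpre
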